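-- pv_equiv track=rewrite | github.com/jcolinpatrick/kryptos | scripts/blitz_t_position.py | t_position_key
-- ===== SOURCE A (Python) =====
-- def t_position_key(ct_str, alpha, mode='vig'):
--     """
--     For each CT char, find the key value that would produce PT=T.
--     Vig: PT = (CT - key) mod 26 = T → key = (CT - T) mod 26
--     Beau: PT = (key - CT) mod 26 = T → key = (T + CT) mod 26
--     """
--     T_idx = alpha.index('T')
--     result = []
--     for c in ct_str:
--         ci = alpha.find(c)
--         if ci < 0: return None
--         if mode == 'vig':
--             ki = (ci - T_idx) % 26
--         else:  # beau
--             ki = (T_idx + ci) % 26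
--         result.append(alpha[ki])
--     return ''.join(result)
-- ===== SOURCE B (Python) =====
-- def t_position_key(ct_str, alpha, mode='vig'):
--     """Recursive decomposition: fold the mode into one signed shift, map the head
--     char, recurse on the tail, and propagate None upward while building the
--     result by string concatenation."""
--     shift = -alpha.index('T') if mode == 'vig' else alpha.index('T')
--
--     def go(s):
--         if not s:
--             return ''
--         i = alpha.find(s[0])
--         if i < 0:
--             return None
--         head = alpha[(i + shift) % 26]
--         rest = go(s[1:])
--         return None if rest is None else head + rest
--
--     return go(ct_str)
-- ===== Notes on version B (the rewrite author's own statement) =====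
-- stated objective: alternative
-- what changed: B folds the per-char mode branch into one signed shift computed up front and replaces A's accumulator loop with structural recursion on the string: map the head char, recurse on the tail, propagate None upward and build the result by concatenation instead of list-append-then-join.
import Mathlib
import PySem

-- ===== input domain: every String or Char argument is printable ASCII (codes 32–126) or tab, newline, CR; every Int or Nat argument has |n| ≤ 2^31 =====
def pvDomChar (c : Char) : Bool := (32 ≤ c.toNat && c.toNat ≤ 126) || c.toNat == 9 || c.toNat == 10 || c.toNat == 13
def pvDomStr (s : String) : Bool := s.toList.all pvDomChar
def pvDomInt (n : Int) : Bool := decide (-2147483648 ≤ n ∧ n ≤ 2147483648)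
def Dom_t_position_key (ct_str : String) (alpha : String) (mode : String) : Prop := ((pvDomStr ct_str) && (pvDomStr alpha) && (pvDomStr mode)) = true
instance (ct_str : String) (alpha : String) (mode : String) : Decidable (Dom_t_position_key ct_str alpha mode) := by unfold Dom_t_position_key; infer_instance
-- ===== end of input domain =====

-- B folds the mode branch into one signed shift and replaces A's accumulator loop with
-- structural recursion (head char, then the tail, None propagated upward): objective 'alternative'.

-- ===== PORT A =====
-- the per-char loop of A: accumulates result chars (''.join of 1-char strings = the char list)
def tposALoop (alpha : String) (mode : String) (tIdx : Int) (ctl : List Char) (acc : List Char) : Option String :=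
  match ctl with
  | [] => some (String.ofList acc.reverse)          -- return ''.join(result)
  | c :: rest =>
    let ci := PySem.Chars.find alpha.toList [c]                 -- ci = alpha.find(c)
    if ci < 0 then none
    else
      let ki := if mode = "vig" then PySem.Int.mod (ci - tIdx) 26 else PySem.Int.mod (tIdx + ci) 26
      match PySem.List.pyGet? alpha.toList ki with              -- alpha[ki]; none = IndexError, excluded by Pre_
      | none => none
      | some ch => tposALoop alpha mode tIdx rest (ch :: acc)

def t_position_key (ct_str : String) (alpha : String) (mode : String) : Option String :=
  -- T_idx = alpha.index('T'); raises ValueError when 'T' ∉ alpha (find = -1 there), excluded by Pre_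
  let tIdx := PySem.Chars.find alpha.toList ['T']
  tposALoop alpha mode tIdx ct_str.toList []

-- ===== PORT B =====
-- go(s): empty → '', else map the head via the precomputed shift, recurse on the tail,
-- propagate None, and build head + rest
def tposBGo (alpha : String) (shift : Int) : List Char → Option (List Char)
  | [] => some []
  | c :: rest =>
    let i := PySem.Chars.find alpha.toList [c]                  -- i = alpha.find(s[0])
    if i < 0 then none
    else
      match PySem.List.pyGet? alpha.toList (PySem.Int.mod (i + shift) 26) with   -- alpha[(i+shift)%26]; none = IndexError, excluded by Pre_
      | none => none
      | some head =>
        match tposBGo alpha shift rest with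
        | none => none
        | some r => some (head :: r)

def t_position_key_alt (ct_str : String) (alpha : String) (mode : String) : Option String :=
  -- shift = -alpha.index('T') if vig else alpha.index('T'); index raises when 'T' ∉ alpha, excluded by Pre_
  let t := PySem.Chars.find alpha.toList ['T']
  let shift := if mode = "vig" then -t else t
  (tposBGo alpha shift ct_str.toList).map String.ofList

-- ===== PRECONDITION & SPEC =====
-- the key index both Pythons compute for alpha position j
def tposKeyIdx (mode : String) (tIdx j : Int) : Int :=
  if mode = "vig" then PySem.Int.mod (j - tIdx) 26 else PySem.Int.mod (tIdx + j) 26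

-- a ciphertext char is 'ok' if it occurs in alpha and its key index is inside alpha
def tposOk (al : List Char) (mode : String) (c : Char) : Bool :=
  match PySem.List.index? al c with
  | none => false
  | some j => decide (tposKeyIdx mode (PySem.Chars.find al ['T']) (j : Int) < (al.length : Int))

-- Pre_ excludes exactly the inputs on which A raises: alpha without 'T' (ValueError at
-- alpha.index('T')), and ciphertexts whose first non-'ok' char is present in alpha
-- (IndexError at alpha[ki]); a first non-'ok' char absent from alpha just returns None.
def Pre_t_position_key (ct_str : String) (alpha : String) (mode : String) : Prop :=
  (alpha.toList.contains 'T' &&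
   ((ct_str.toList.dropWhile (tposOk alpha.toList mode)).take 1).all
     (fun c => !(alpha.toList.contains c))) = true
instance (ct_str : String) (alpha : String) (mode : String) : Decidable (Pre_t_position_key ct_str alpha mode) := by unfold Pre_t_position_key; infer_instance

def pvWitness_t_position_key : String × String × String := ("AB", "TAB", "vig")

def Spec_t_position_key (ct_str : String) (alpha : String) (mode : String) (out : Option String) : Prop := out = t_position_key_alt ct_str alpha mode
instance (ct_str : String) (alpha : String) (mode : String) (out : Option String) : Decidable (Spec_t_position_key ct_str alpha mode out) := by unfold Spec_t_position_key; infer_instance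

-- ===== CLAIM (what is proved, stated in full; the proofs are below) =====
def Claim_equal_t_position_key : Prop := ∀ (ct_str : String) (alpha : String) (mode : String), Dom_t_position_key ct_str alpha mode → Pre_t_position_key ct_str alpha mode → Spec_t_position_key ct_str alpha mode (t_position_key ct_str alpha mode)

-- ===== LEMMAS AND PROOFS =====

-- both programs compute the same key index for a char found at position ci
theorem tpos_key_eq (mode : String) (tIdx ci : Int) :
    (if mode = "vig" then PySem.Int.mod (ci - tIdx) 26 else PySem.Int.mod (tIdx + ci) 26)
    = PySem.Int.mod (ci + (if mode = "vig" then -tIdx else tIdx)) 26 := by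
  split <;> ring_nf

-- A's accumulator loop against B's structural recursion, for any accumulator
theorem tpos_loop_eq_go (alpha : String) (mode : String) (tIdx : Int) (ctl : List Char) :
    ∀ acc : List Char,
    tposALoop alpha mode tIdx ctl acc
    = (tposBGo alpha (if mode = "vig" then -tIdx else tIdx) ctl).map
        (fun r => String.ofList (acc.reverse ++ r)) := by
  induction ctl with
  | nil => intro acc; simp [tposALoop, tposBGo]
  | cons c rest ih =>
    intro acc
    simp only [tposALoop, tposBGo]
    by_cases hneg : PySem.Chars.find alpha.toList [c] < 0
    · rw [if_pos hneg, if_pos hneg]; rfl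
    · rw [if_neg hneg, if_neg hneg]
      rw [tpos_key_eq mode tIdx (PySem.Chars.find alpha.toList [c])]
      rcases hget : PySem.List.pyGet? alpha.toList
          (PySem.Int.mod (PySem.Chars.find alpha.toList [c] + (if mode = "vig" then -tIdx else tIdx)) 26) with _ | ch
      · rfl
      · dsimp only
        rw [ih (ch :: acc)]
        rcases tposBGo alpha (if mode = "vig" then -tIdx else tIdx) rest with _ | r
        · rfl
        · simp

-- ===== VERDICT (by name: the statement is the Claim_ definition above) =====
theorem t_position_key_spec : Claim_equal_t_position_key := by
  intro ct_str alpha mode _ _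
  unfold Spec_t_position_key t_position_key t_position_key_alt
  rw [tpos_loop_eq_go alpha mode (PySem.Chars.find alpha.toList ['T']) ct_str.toList []]
  rfl
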